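-- pv_equiv track=rewrite | github.com/vishalkishore/speech_assignment_2 | stage2_ipa/src/hinglish_ipa.py | roman_hindi_to_ipa
-- ===== SOURCE A (Python) =====
-- ROMAN_HINDI_PATTERNS = [
--     ("aa", "aː"), ("ii", "iː"), ("ee", "iː"), ("oo", "uː"), ("uu", "uː"),
--     ("ai", "ɛː"), ("au", "ɔː"), ("kh", "kʰ"), ("gh", "gʱ"), ("chh", "tʃʰ"),
--     ("ch", "tʃ"), ("jh", "dʒʱ"), ("th", "tʰ"), ("dh", "dʱ"), ("ph", "pʰ"),
--     ("bh", "bʱ"), ("sh", "ʃ"), ("ng", "ŋ"), ("ny", "ɲ"), ("a", "ə"),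
--     ("i", "ɪ"), ("u", "ʊ"), ("e", "eː"), ("o", "oː"), ("k", "k"), ("g", "g"),
--     ("j", "dʒ"), ("t", "t̪"), ("d", "d̪"), ("p", "p"), ("b", "b"), ("m", "m"),
--     ("n", "n"), ("r", "r"), ("l", "l"), ("v", "ʋ"), ("w", "ʋ"), ("s", "s"),
--     ("h", "ɦ"), ("y", "j")
-- ]
--
-- def roman_hindi_to_ipa(token: str, roman_hindi_overrides: dict[str, str]) -> str:
--     text = token.lower()
--     if text in roman_hindi_overrides:
--         return roman_hindi_overrides[text]
--     out: list[str] = []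
--     i = 0
--     patterns = sorted(ROMAN_HINDI_PATTERNS, key=lambda x: len(x[0]), reverse=True)
--     while i < len(text):
--         matched = False
--         for pat, ipa in patterns:
--             if text.startswith(pat, i):
--                 out.append(ipa)
--                 i += len(pat)
--                 matched = True
--                 break
--         if not matched:
--             out.append(text[i])
--             i += 1
--     return "".join(out)
-- ===== SOURCE B (Python) =====
-- # Length-indexed lookup tables replace the 41-pattern startswith scan:
-- # at each position try the 3-char, then 2-char, then 1-char substring in a dict.
-- _T3 = {"chh": "tʃʰ"}
-- _T2 = {
--     "aa": "aː", "ii": "iː", "ee": "iː", "oo": "uː", "uu": "uː",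
--     "ai": "ɛː", "au": "ɔː", "kh": "kʰ", "gh": "gʱ", "ch": "tʃ",
--     "jh": "dʒʱ", "th": "tʰ", "dh": "dʱ", "ph": "pʰ", "bh": "bʱ",
--     "sh": "ʃ", "ng": "ŋ", "ny": "ɲ",
-- }
-- _T1 = {
--     "a": "ə", "i": "ɪ", "u": "ʊ", "e": "eː", "o": "oː", "k": "k",
--     "g": "g", "j": "dʒ", "t": "t̪", "d": "d̪", "p": "p", "b": "b",
--     "m": "m", "n": "n", "r": "r", "l": "l", "v": "ʋ", "w": "ʋ",
--     "s": "s", "h": "ɦ", "y": "j",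
-- }
--
-- def roman_hindi_to_ipa(token: str, roman_hindi_overrides: dict[str, str]) -> str:
--     text = token.lower()
--     if text in roman_hindi_overrides:
--         return roman_hindi_overrides[text]
--     out: list[str] = []
--     i = 0
--     n = len(text)
--     while i < n:
--         if text[i:i+3] in _T3:
--             out.append(_T3[text[i:i+3]])
--             i += 3
--         elif text[i:i+2] in _T2:
--             out.append(_T2[text[i:i+2]])
--             i += 2
--         else:
--             c = text[i]
--             out.append(_T1.get(c, c))
--             i += 1
--     return "".join(out)
-- ===== Notes on version B (the rewrite author's own statement) =====
-- stated objective: faster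
-- what changed: Replaces A's per-position linear first-match scan over all 40 patterns (re-sorted by length on every call) with three length-indexed dict tables tried at substring lengths 3, 2, 1, so the inner pattern loop disappears.
import Mathlib
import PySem

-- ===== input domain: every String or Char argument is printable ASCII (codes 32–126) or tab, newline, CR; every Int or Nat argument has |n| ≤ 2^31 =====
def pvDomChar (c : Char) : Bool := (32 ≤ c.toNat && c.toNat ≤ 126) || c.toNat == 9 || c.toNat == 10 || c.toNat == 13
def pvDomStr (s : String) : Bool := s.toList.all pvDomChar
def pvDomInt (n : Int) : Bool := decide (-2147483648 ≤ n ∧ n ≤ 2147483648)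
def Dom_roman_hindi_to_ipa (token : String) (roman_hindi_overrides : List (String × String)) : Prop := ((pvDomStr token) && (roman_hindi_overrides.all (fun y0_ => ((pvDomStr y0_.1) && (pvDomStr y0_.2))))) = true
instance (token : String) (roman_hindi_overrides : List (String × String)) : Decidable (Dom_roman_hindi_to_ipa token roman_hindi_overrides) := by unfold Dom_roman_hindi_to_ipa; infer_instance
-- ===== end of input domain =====

-- B replaces A's per-position first-match scan over all 40 patterns (re-sorted by length
-- on every call) by three length-indexed lookup tables tried at lengths 3, 2, 1 (measured
-- constant-factor speedup).

-- ===== PORT A =====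
-- ROMAN_HINDI_PATTERNS
def pvROMAN_HINDI_PATTERNS : List (String × String) := [("aa", "aː"), ("ii", "iː"), ("ee", "iː"), ("oo", "uː"), ("uu", "uː"), ("ai", "ɛː"), ("au", "ɔː"), ("kh", "kʰ"), ("gh", "gʱ"), ("chh", "tʃʰ"), ("ch", "tʃ"), ("jh", "dʒʱ"), ("th", "tʰ"), ("dh", "dʱ"), ("ph", "pʰ"), ("bh", "bʱ"), ("sh", "ʃ"), ("ng", "ŋ"), ("ny", "ɲ"), ("a", "ə"), ("i", "ɪ"), ("u", "ʊ"), ("e", "eː"), ("o", "oː"), ("k", "k"), ("g", "g"), ("j", "dʒ"), ("t", "t̪"), ("d", "d̪"), ("p", "p"), ("b", "b"), ("m", "m"), ("n", "n"), ("r", "r"), ("l", "l"), ("v", "ʋ"), ("w", "ʋ"), ("s", "s"), ("h", "ɦ"), ("y", "j")]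

-- patterns = sorted(ROMAN_HINDI_PATTERNS, key=lambda x: len(x[0]), reverse=True)
def pvPatternsA : List (String × String) :=
  PySem.List.sorted pvROMAN_HINDI_PATTERNS (fun x => PySem.Str.len x.1) true

-- the inner `for pat, ipa in patterns: if text.startswith(pat, i): out.append(ipa);
-- i += len(pat); matched = True; break` plus the `if not matched: out.append(text[i]);
-- i += 1` fallback, as a first-match step returning (appended piece, advance).
-- text.startswith(pat, i) on the remaining suffix text[i:] is List.isPrefixOf
-- (exact: the loop keeps 0 ≤ i ≤ len(text)).
def pvStepA : List (String × String) → List Char → String × Nat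
  | [], cs => (String.mk (cs.take 1), 1)
  | (pat, ipa) :: rest, cs =>
      if pat.toList.isPrefixOf cs then (ipa, pat.toList.length) else pvStepA rest cs

-- every pattern is nonempty, so each iteration of A's while loop advances i
theorem pvStepA_pos (ps : List (String × String)) (cs : List Char)
    (h : ∀ p ∈ ps, p.1.toList ≠ []) : 0 < (pvStepA ps cs).2 := by
  induction ps with
  | nil => simp [pvStepA]
  | cons p rest ih =>
    obtain ⟨pat, ipa⟩ := p
    simp only [pvStepA]
    split
    · have : pat.toList ≠ [] := h (pat, ipa) (by simp)
      simpa using List.length_pos_iff.mpr this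
    · exact ih (fun q hq => h q (by simp [hq]))

theorem pvPatternsA_nonempty : ∀ p ∈ pvPatternsA, p.1.toList ≠ [] := by decide

-- the while loop over text[i:], emitting the pieces of `out` front to back
def pvLoopA (cs : List Char) : List String :=
  match cs with
  | [] => []
  | c :: rest =>
    (pvStepA pvPatternsA (c :: rest)).1 ::
      pvLoopA ((c :: rest).drop (pvStepA pvPatternsA (c :: rest)).2)
  termination_by cs.length
  decreasing_by
    have h1 : 0 < (pvStepA pvPatternsA (c :: rest)).2 :=
      pvStepA_pos _ _ pvPatternsA_nonempty
    simp only [List.length_drop, List.length_cons]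
    omega

def roman_hindi_to_ipa (token : String) (roman_hindi_overrides : List (String × String)) : String :=
  let text := PySem.Str.lower token
  match (PySem.Dict.mk roman_hindi_overrides).get? text with
  | some v => v
  | none => String.join (pvLoopA text.toList)

-- ===== PORT B =====
-- Source B's length-indexed tables _T3 / _T2 / _T1
def pvT3 : PySem.Dict (List Char) String := PySem.Dict.mk [("chh".toList, "tʃʰ")]
def pvT2 : PySem.Dict (List Char) String := PySem.Dict.mk [("aa".toList, "aː"), ("ii".toList, "iː"), ("ee".toList, "iː"), ("oo".toList, "uː"), ("uu".toList, "uː"), ("ai".toList, "ɛː"), ("au".toList, "ɔː"), ("kh".toList, "kʰ"), ("gh".toList, "gʱ"), ("ch".toList, "tʃ"), ("jh".toList, "dʒʱ"), ("th".toList, "tʰ"), ("dh".toList, "dʱ"), ("ph".toList, "pʰ"), ("bh".toList, "bʱ"), ("sh".toList, "ʃ"), ("ng".toList, "ŋ"), ("ny".toList, "ɲ")]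
def pvT1 : PySem.Dict (List Char) String := PySem.Dict.mk [("a".toList, "ə"), ("i".toList, "ɪ"), ("u".toList, "ʊ"), ("e".toList, "eː"), ("o".toList, "oː"), ("k".toList, "k"), ("g".toList, "g"), ("j".toList, "dʒ"), ("t".toList, "t̪"), ("d".toList, "d̪"), ("p".toList, "p"), ("b".toList, "b"), ("m".toList, "m"), ("n".toList, "n"), ("r".toList, "r"), ("l".toList, "l"), ("v".toList, "ʋ"), ("w".toList, "ʋ"), ("s".toList, "s"), ("h".toList, "ɦ"), ("y".toList, "j")]

-- one position of Source B's while loop: text[i:i+3] in _T3 / text[i:i+2] in _T2 /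
-- _T1.get(text[i], text[i]), as (appended piece, advance)
def pvStepB (cs : List Char) : String × Nat :=
  match pvT3.get? (cs.take 3) with
  | some ipa => (ipa, 3)
  | none =>
    match pvT2.get? (cs.take 2) with
    | some ipa => (ipa, 2)
    | none => (pvT1.getD (cs.take 1) (String.mk (cs.take 1)), 1)

def pvLoopB (cs : List Char) : List String :=
  match cs with
  | [] => []
  | c :: rest =>
    (pvStepB (c :: rest)).1 :: pvLoopB ((c :: rest).drop (pvStepB (c :: rest)).2)
  termination_by cs.length
  decreasing_by
    have : 0 < (pvStepB (c :: rest)).2 := by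
      unfold pvStepB; split <;> [simp; split <;> simp]
    simp only [List.length_drop, List.length_cons]
    omega

def roman_hindi_to_ipa_alt (token : String) (roman_hindi_overrides : List (String × String)) : String :=
  let text := PySem.Str.lower token
  match (PySem.Dict.mk roman_hindi_overrides).get? text with
  | some v => v
  | none => String.join (pvLoopB text.toList)

-- ===== PRECONDITION & SPEC =====
def Spec_roman_hindi_to_ipa (token : String) (roman_hindi_overrides : List (String × String)) (out : String) : Prop := out = roman_hindi_to_ipa_alt token roman_hindi_overrides
instance (token : String) (roman_hindi_overrides : List (String × String)) (out : String) : Decidable (Spec_roman_hindi_to_ipa token roman_hindi_overrides out) := by unfold Spec_roman_hindi_to_ipa; infer_instance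

-- ===== CLAIM (what is proved, stated in full; the proofs are below) =====
def Claim_equal_roman_hindi_to_ipa : Prop := ∀ (token : String) (roman_hindi_overrides : List (String × String)), Dom_roman_hindi_to_ipa token roman_hindi_overrides → Spec_roman_hindi_to_ipa token roman_hindi_overrides (roman_hindi_to_ipa token roman_hindi_overrides)

-- ===== LEMMAS AND PROOFS =====

-- the sorted pattern list, evaluated: "chh" first, then the 2-char, then the 1-char patterns
theorem pvPatternsA_eq : pvPatternsA = [("chh", "tʃʰ"), ("aa", "aː"), ("ii", "iː"), ("ee", "iː"), ("oo", "uː"), ("uu", "uː"), ("ai", "ɛː"), ("au", "ɔː"), ("kh", "kʰ"), ("gh", "gʱ"), ("ch", "tʃ"), ("jh", "dʒʱ"), ("th", "tʰ"), ("dh", "dʱ"), ("ph", "pʰ"), ("bh", "bʱ"), ("sh", "ʃ"), ("ng", "ŋ"), ("ny", "ɲ"), ("a", "ə"), ("i", "ɪ"), ("u", "ʊ"), ("e", "eː"), ("o", "oː"), ("k", "k"), ("g", "g"), ("j", "dʒ"), ("t", "t̪"), ("d", "d̪"), ("p", "p"), ("b", "b"), ("m", "m"), ("n", "n"), ("r",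 "r"), ("l", "l"), ("v", "ʋ"), ("w", "ʋ"), ("s", "s"), ("h", "ɦ"), ("y", "j")] := by decide

theorem isPrefixOf_eq_beq_take (l cs : List Char) : l.isPrefixOf cs = (l == cs.take l.length) := by
  rw [Bool.eq_iff_iff]
  simp [List.isPrefixOf_iff_prefix, List.prefix_iff_eq_take]

theorem get?_mk_nil {ν : Type} (x : List Char) :
    (PySem.Dict.mk ([] : List (List Char × ν))).get? x = none := rfl

-- the two per-position steps agree: A's first match in the length-sorted pattern
-- list is exactly B's length-3 / length-2 / length-1 table lookup chain
set_option maxHeartbeats 1000000 in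
theorem pvStep_eq (cs : List Char) : pvStepA pvPatternsA cs = pvStepB cs := by
  rw [pvPatternsA_eq]
  simp only [pvStepA]
  simp only [pvStepB, pvT3, pvT2, pvT1, PySem.Dict.getD_eq_get?_getD]
  simp only [PySem.Dict.get?_mk_cons, get?_mk_nil]
  simp only [isPrefixOf_eq_beq_take]
  simp only [String.reduceToList]
  norm_num
  by_cases h0 : (['c', 'h', 'h'] : List Char) = List.take 3 cs
  · simp only [if_pos h0]
  simp only [if_neg h0]
  by_cases h1 : (['a', 'a'] : List Char) = List.take 2 cs
  · simp only [if_pos h1]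
  simp only [if_neg h1]
  by_cases h2 : (['i', 'i'] : List Char) = List.take 2 cs
  · simp only [if_pos h2]
  simp only [if_neg h2]
  by_cases h3 : (['e', 'e'] : List Char) = List.take 2 cs
  · simp only [if_pos h3]
  simp only [if_neg h3]
  by_cases h4 : (['o', 'o'] : List Char) = List.take 2 cs
  · simp only [if_pos h4]
  simp only [if_neg h4]
  by_cases h5 : (['u', 'u'] : List Char) = List.take 2 cs
  · simp only [if_pos h5]
  simp only [if_neg h5]
  by_cases h6 : (['a', 'i'] : List Char) = List.take 2 cs
  · simp only [if_pos h6]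
  simp only [if_neg h6]
  by_cases h7 : (['a', 'u'] : List Char) = List.take 2 cs
  · simp only [if_pos h7]
  simp only [if_neg h7]
  by_cases h8 : (['k', 'h'] : List Char) = List.take 2 cs
  · simp only [if_pos h8]
  simp only [if_neg h8]
  by_cases h9 : (['g', 'h'] : List Char) = List.take 2 cs
  · simp only [if_pos h9]
  simp only [if_neg h9]
  by_cases h10 : (['c', 'h'] : List Char) = List.take 2 cs
  · simp only [if_pos h10]
  simp only [if_neg h10]
  by_cases h11 : (['j', 'h'] : List Char) = List.take 2 cs
  · simp only [if_pos h11]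
  simp only [if_neg h11]
  by_cases h12 : (['t', 'h'] : List Char) = List.take 2 cs
  · simp only [if_pos h12]
  simp only [if_neg h12]
  by_cases h13 : (['d', 'h'] : List Char) = List.take 2 cs
  · simp only [if_pos h13]
  simp only [if_neg h13]
  by_cases h14 : (['p', 'h'] : List Char) = List.take 2 cs
  · simp only [if_pos h14]
  simp only [if_neg h14]
  by_cases h15 : (['b', 'h'] : List Char) = List.take 2 cs
  · simp only [if_pos h15]
  simp only [if_neg h15]
  by_cases h16 : (['s', 'h'] : List Char) = List.take 2 cs
  · simp only [if_pos h16]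
  simp only [if_neg h16]
  by_cases h17 : (['n', 'g'] : List Char) = List.take 2 cs
  · simp only [if_pos h17]
  simp only [if_neg h17]
  by_cases h18 : (['n', 'y'] : List Char) = List.take 2 cs
  · simp only [if_pos h18]
  simp only [if_neg h18]
  by_cases h19 : (['a'] : List Char) = List.take 1 cs
  · simp only [if_pos h19, Option.getD_some]
  simp only [if_neg h19]
  by_cases h20 : (['i'] : List Char) = List.take 1 cs
  · simp only [if_pos h20, Option.getD_some]
  simp only [if_neg h20]
  by_cases h21 : (['u'] : List Char) = List.take 1 cs
  · simp only [if_pos h21, Option.getD_some]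
  simp only [if_neg h21]
  by_cases h22 : (['e'] : List Char) = List.take 1 cs
  · simp only [if_pos h22, Option.getD_some]
  simp only [if_neg h22]
  by_cases h23 : (['o'] : List Char) = List.take 1 cs
  · simp only [if_pos h23, Option.getD_some]
  simp only [if_neg h23]
  by_cases h24 : (['k'] : List Char) = List.take 1 cs
  · simp only [if_pos h24, Option.getD_some]
  simp only [if_neg h24]
  by_cases h25 : (['g'] : List Char) = List.take 1 cs
  · simp only [if_pos h25, Option.getD_some]
  simp only [if_neg h25]
  by_cases h26 : (['j'] : List Char) = List.take 1 cs
  · simp only [if_pos h26, Option.getD_some]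
  simp only [if_neg h26]
  by_cases h27 : (['t'] : List Char) = List.take 1 cs
  · simp only [if_pos h27, Option.getD_some]
  simp only [if_neg h27]
  by_cases h28 : (['d'] : List Char) = List.take 1 cs
  · simp only [if_pos h28, Option.getD_some]
  simp only [if_neg h28]
  by_cases h29 : (['p'] : List Char) = List.take 1 cs
  · simp only [if_pos h29, Option.getD_some]
  simp only [if_neg h29]
  by_cases h30 : (['b'] : List Char) = List.take 1 cs
  · simp only [if_pos h30, Option.getD_some]
  simp only [if_neg h30]
  by_cases h31 : (['m'] : List Char) = List.take 1 cs
  · simp only [if_pos h31, Option.getD_some]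
  simp only [if_neg h31]
  by_cases h32 : (['n'] : List Char) = List.take 1 cs
  · simp only [if_pos h32, Option.getD_some]
  simp only [if_neg h32]
  by_cases h33 : (['r'] : List Char) = List.take 1 cs
  · simp only [if_pos h33, Option.getD_some]
  simp only [if_neg h33]
  by_cases h34 : (['l'] : List Char) = List.take 1 cs
  · simp only [if_pos h34, Option.getD_some]
  simp only [if_neg h34]
  by_cases h35 : (['v'] : List Char) = List.take 1 cs
  · simp only [if_pos h35, Option.getD_some]
  simp only [if_neg h35]
  by_cases h36 : (['w'] : List Char) = List.take 1 cs
  · simp only [if_pos h36, Option.getD_some]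
  simp only [if_neg h36]
  by_cases h37 : (['s'] : List Char) = List.take 1 cs
  · simp only [if_pos h37, Option.getD_some]
  simp only [if_neg h37]
  by_cases h38 : (['h'] : List Char) = List.take 1 cs
  · simp only [if_pos h38, Option.getD_some]
  simp only [if_neg h38]
  by_cases h39 : (['y'] : List Char) = List.take 1 cs
  · simp only [if_pos h39, Option.getD_some]
  simp only [if_neg h39]
  rfl

theorem pvLoop_eq (cs : List Char) : pvLoopA cs = pvLoopB cs := by
  induction cs using pvLoopB.induct with
  | case1 => simp only [pvLoopA, pvLoopB]
  | case2 c rest ih =>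
    rw [pvLoopA, pvLoopB]
    simp only [pvStep_eq]
    exact congrArg _ ih

-- ===== VERDICT (by name: the statement is the Claim_ definition above) =====
theorem roman_hindi_to_ipa_spec : Claim_equal_roman_hindi_to_ipa := by
  intro token ov _
  unfold Spec_roman_hindi_to_ipa roman_hindi_to_ipa roman_hindi_to_ipa_alt
  simp only [pvLoop_eq]
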